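-- pv_equiv track=rewrite | github.com/klausgerlicher/fastfixupfinder | fastfixupfinder/fixup_creator.py | _parse_diff_for_target_lines
-- ===== SOURCE A (Python) =====
-- def _parse_diff_for_target_lines(diff_output: str, target_lines: set) -> list:
--     """Parse git diff output to determine which hunks contain target lines.
--
--     Args:
--         diff_output: Output from git diff
--         target_lines: Set of line numbers that belong to the target
--
--     Returns:
--         list: Boolean list indicating which hunks to accept
--     """
--     lines = diff_output.split('\n')
--     hunks_to_accept = []
--     current_hunk_has_target = False
--     in_hunk = False
--
--     for line in lines:
--         # Start of new hunk
--         if line.startswith('@@'):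
--             # If we were in a previous hunk, record the decision
--             if in_hunk:
--                 hunks_to_accept.append(current_hunk_has_target)
--
--             # Parse hunk header to get line numbers
--             # Format: @@ -old_start,old_count +new_start,new_count @@
--             parts = line.split()
--             if len(parts) >= 3:
--                 new_range = parts[2]  # +new_start,new_count
--                 if ',' in new_range:
--                     new_start = int(new_range.split(',')[0][1:])  # Remove '+'
--                 else:
--                     new_start = int(new_range[1:])  # Remove '+'
--
--                 # Check if any target lines fall in this hunk range
--                 # This is a simplified check - we'll refine based on actual diff content
--                 current_hunk_has_target = any(
--                     abs(line_num - new_start) < 10  # rough proximity check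
--                     for line_num in target_lines
--                 )
--             else:
--                 current_hunk_has_target = False
--
--             in_hunk = True
--
--         # More precise check: if we see a specific line change that matches our targets
--         elif line.startswith(('+', '-', ' ')) and in_hunk:
--             # This is a rough implementation - in practice, we'd need more sophisticated
--             # line tracking to match exact line numbers from our analysis
--             pass
--
--     # Don't forget the last hunk
--     if in_hunk:
--         hunks_to_accept.append(current_hunk_has_target)
--
--     return hunks_to_accept
-- ===== SOURCE B (Python) =====
-- def _hunk_decision(near, line):
--     """Decision for one '@@' header line: does its +new_start lie in the near set?"""
--     parts = line.split()
--     if len(parts) >= 3: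
--         new_range = parts[2]
--         if ',' in new_range:
--             new_start = int(new_range.split(',')[0][1:])
--         else:
--             new_start = int(new_range[1:])
--         return new_start in near
--     return False
--
--
-- def _parse_diff_for_target_lines(diff_output: str, target_lines: set) -> list:
--     """Same result as A: precompute the set of all line numbers within distance < 10
--     of any target line, then decide each '@@' header by one set-membership test;
--     decisions are collected by a comprehension over the header lines instead of a
--     stateful in_hunk loop."""
--     near = set()
--     for t in target_lines:
--         for d in range(-9, 10):
--             near.add(t + d)
--     return [_hunk_decision(near, line)
--             for line in diff_output.split('\n') if line.startswith('@@')]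
-- ===== Notes on version B (the rewrite author's own statement) =====
-- stated objective: alternative
-- what changed: B precomputes a 'near' set of all integers within distance <10 of any target line and decides each '@@' header by one set-membership test in a comprehension over header lines, replacing A's stateful in_hunk/current_hunk loop that scans every target line per hunk; per-hunk work becomes O(1) at the price of an O(T) set build (not measurably faster on the generated timing inputs, which contain no hunk headers).
-- outside the precondition, e.g. on _parse_diff_for_target_lines('@@ -1 +x @@', {1}): A raises ValueError, B raises ValueError
import Mathlib
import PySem

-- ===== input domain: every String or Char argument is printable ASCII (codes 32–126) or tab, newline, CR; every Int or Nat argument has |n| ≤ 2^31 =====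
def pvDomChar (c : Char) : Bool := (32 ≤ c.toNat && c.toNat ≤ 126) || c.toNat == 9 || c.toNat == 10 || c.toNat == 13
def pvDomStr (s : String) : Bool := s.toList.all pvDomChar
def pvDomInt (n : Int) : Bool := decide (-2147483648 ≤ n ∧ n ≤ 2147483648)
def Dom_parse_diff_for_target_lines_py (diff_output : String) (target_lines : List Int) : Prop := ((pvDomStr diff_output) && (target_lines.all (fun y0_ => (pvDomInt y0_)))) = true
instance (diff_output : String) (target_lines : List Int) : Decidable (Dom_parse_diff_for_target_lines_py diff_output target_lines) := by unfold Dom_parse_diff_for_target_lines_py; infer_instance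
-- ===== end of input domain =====

-- B replaces A's per-hunk scan of all target lines by one precomputed "near" set
-- (all integers within distance < 10 of a target) and a single membership test per
-- hunk header, collecting decisions with a comprehension over header lines instead of
-- A's in_hunk/current_hunk state machine; objective: alternative (different algorithm).


-- ===== PORT A =====
-- parse the '+new_start[,count]' field of a header line with ≥ 3 whitespace parts;
-- Python raises ValueError where ofStr? is none — totalised with .getD 0, those inputs are outside Pre_
def pvNewStartA (line : String) : Int :=
  let parts := PySem.Str.split₀ line
  let new_range := PySem.List.pyGetD parts 2 ""
  if PySem.Str.isIn "," new_range then
    (PySem.Int.ofStr? (PySem.Str.slice (PySem.List.pyGetD ((PySem.Str.split? new_range ",").getD []) 0 "") (some 1) none)).getD 0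
  else
    (PySem.Int.ofStr? (PySem.Str.slice new_range (some 1) none)).getD 0

-- loop body of A: state (hunks_to_accept, current_hunk_has_target, in_hunk)
def pvStepA (target_lines : List Int) (st : List Bool × Bool × Bool) (line : String) : List Bool × Bool × Bool :=
  if PySem.Str.startswith line "@@" then
    let acc := if st.2.2 then st.1 ++ [st.2.1] else st.1
    if 3 ≤ (PySem.Str.split₀ line).length then
      let new_start := pvNewStartA line
      (acc, target_lines.any (fun line_num => decide (|line_num - new_start| < 10)), true)
    else
      (acc, false, true)
  else if (PySem.Str.startswith line "+" || PySem.Str.startswith line "-" || PySem.Str.startswith line " ") && st.2.2 then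
    st  -- pass
  else
    st

def parse_diff_for_target_lines_py (diff_output : String) (target_lines : List Int) : List Bool :=
  let lines := (PySem.Str.split? diff_output "\n").getD []
  let st := lines.foldl (pvStepA target_lines) ([], false, false)
  if st.2.2 then st.1 ++ [st.2.1] else st.1

-- ===== PORT B =====
-- near = { t + d | t ∈ target_lines, d ∈ range(-9, 10) }
def pvNearSet (target_lines : List Int) : PySem.Set Int :=
  target_lines.foldl
    (fun near t => (PySem.List.pyRange (-9) 10 1).foldl (fun near d => PySem.Set.add near (t + d)) near)
    PySem.Set.empty

-- decision for one '@@' header line (same ValueError totalisation as the A side)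
def pvHunkDecisionB (near : PySem.Set Int) (line : String) : Bool :=
  let parts := PySem.Str.split₀ line
  if 3 ≤ parts.length then
    let new_range := PySem.List.pyGetD parts 2 ""
    let new_start :=
      if PySem.Str.isIn "," new_range then
        (PySem.Int.ofStr? (PySem.Str.slice (PySem.List.pyGetD ((PySem.Str.split? new_range ",").getD []) 0 "") (some 1) none)).getD 0
      else
        (PySem.Int.ofStr? (PySem.Str.slice new_range (some 1) none)).getD 0
    PySem.Set.contains near new_start
  else
    false

def parse_diff_for_target_lines_py_alt (diff_output : String) (target_lines : List Int) : List Bool :=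
  let near := pvNearSet target_lines
  (((PySem.Str.split? diff_output "\n").getD []).filter (fun line => PySem.Str.startswith line "@@")).map
    (pvHunkDecisionB near)

-- ===== PRECONDITION & SPEC =====
-- the '+new_start' field of a header line parses as a Python int (else A raises ValueError)
def pvHeaderOk (line : String) : Bool :=
  let parts := PySem.Str.split₀ line
  if 3 ≤ parts.length then
    let new_range := PySem.List.pyGetD parts 2 ""
    let num :=
      if PySem.Str.isIn "," new_range then
        PySem.Str.slice (PySem.List.pyGetD ((PySem.Str.split? new_range ",").getD []) 0 "") (some 1) none
      else
        PySem.Str.slice new_range (some 1) none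
    (PySem.Int.ofStr? num).isSome
  else
    true

-- Pre_ excludes exactly the inputs where Python A raises ValueError: a line starting
-- '@@' with ≥ 3 whitespace-separated parts whose '+new_start' field is not int()-parseable.
def Pre_parse_diff_for_target_lines_py (diff_output : String) (target_lines : List Int) : Prop :=
  ∀ line ∈ (PySem.Str.split? diff_output "\n").getD [],
    PySem.Str.startswith line "@@" = true → pvHeaderOk line = true
instance (diff_output : String) (target_lines : List Int) : Decidable (Pre_parse_diff_for_target_lines_py diff_output target_lines) := by unfold Pre_parse_diff_for_target_lines_py; infer_instance

def pvWitness_parse_diff_for_target_lines_py : String × List Int :=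
  ("@@ -1,2 +3,4 @@\n+new line\n ctx\n@@ -8 +20 @@\n-old", [5, 40])

def Spec_parse_diff_for_target_lines_py (diff_output : String) (target_lines : List Int) (out : List Bool) : Prop := out = parse_diff_for_target_lines_py_alt diff_output target_lines
instance (diff_output : String) (target_lines : List Int) (out : List Bool) : Decidable (Spec_parse_diff_for_target_lines_py diff_output target_lines out) := by unfold Spec_parse_diff_for_target_lines_py; infer_instance

-- ===== CLAIM (what is proved, stated in full; the proofs are below) =====
def Claim_equal_parse_diff_for_target_lines_py : Prop := ∀ (diff_output : String) (target_lines : List Int), Dom_parse_diff_for_target_lines_py diff_output target_lines → Pre_parse_diff_for_target_lines_py diff_output target_lines → Spec_parse_diff_for_target_lines_py diff_output target_lines (parse_diff_for_target_lines_py diff_output target_lines)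

-- ===== LEMMAS AND PROOFS =====

-- membership in the near set is exactly A's proximity predicate
lemma pv_mem_nearSet (target_lines : List Int) (s : Int) :
    s ∈ pvNearSet target_lines ↔ ∃ t ∈ target_lines, |t - s| < 10 := by
  have hstep : ∀ (near : PySem.Set Int) (t : Int),
      (PySem.List.pyRange (-9) 10 1).foldl (fun near d => PySem.Set.add near (t + d)) near
        = PySem.Set.update near ((PySem.List.pyRange (-9) 10 1).map (fun d => t + d)) := by
    intro near t
    rw [PySem.Set.update, List.foldl_map]
  have main : ∀ (l : List Int) (near : PySem.Set Int),
      s ∈ l.foldl (fun near t => (PySem.List.pyRange (-9) 10 1).foldl (fun near d => PySem.Set.add near (t + d)) near) near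
        ↔ s ∈ near ∨ ∃ t ∈ l, |t - s| < 10 := by
    intro l
    induction l with
    | nil => simp
    | cons t rest ih =>
      intro near
      rw [List.foldl_cons, ih, hstep]
      simp only [PySem.Set.mem_update, List.mem_map, PySem.List.mem_pyRange_one, List.mem_cons, abs_lt]
      constructor
      · rintro ((h | ⟨d, ⟨hd1, hd2⟩, hds⟩) | ⟨u, hu, hprox⟩)
        · exact Or.inl h
        · exact Or.inr ⟨t, Or.inl rfl, by omega⟩
        · exact Or.inr ⟨u, Or.inr hu, hprox⟩
      · rintro (h | ⟨u, hut | hu, hprox⟩)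
        · exact Or.inl (Or.inl h)
        · exact Or.inl (Or.inr ⟨s - u, ⟨by omega, by omega⟩, by omega⟩)
        · exact Or.inr ⟨u, hu, hprox⟩
  rw [pvNearSet, main]
  simp [PySem.Set.empty]

lemma pv_any_eq_contains (target_lines : List Int) (s : Int) :
    (target_lines.any fun line_num => decide (|line_num - s| < 10))
      = PySem.Set.contains (pvNearSet target_lines) s := by
  by_cases h : ∃ t ∈ target_lines, |t - s| < 10
  · have h1 : (target_lines.any fun line_num => decide (|line_num - s| < 10)) = true := by
      simpa [List.any_eq_true] using h
    have h2 : PySem.Set.contains (pvNearSet target_lines) s = true :=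
      (PySem.Set.contains_iff _ _).mpr ((pv_mem_nearSet target_lines s).mpr h)
    rw [h1, h2]
  · have h1 : (target_lines.any fun line_num => decide (|line_num - s| < 10)) = false := by
      simpa [List.any_eq_true] using h
    have h2 : PySem.Set.contains (pvNearSet target_lines) s = false := by
      rw [← Bool.not_eq_true, PySem.Set.contains_iff]
      exact fun hm => h ((pv_mem_nearSet target_lines s).mp hm)
    rw [h1, h2]

-- on a header line, A's per-hunk decision coincides with B's
lemma pv_decision_eq (target_lines : List Int) (line : String)
    (h : 3 ≤ (PySem.Str.split₀ line).length) :
    (target_lines.any fun line_num => decide (|line_num - pvNewStartA line| < 10))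
      = pvHunkDecisionB (pvNearSet target_lines) line := by
  rw [pvHunkDecisionB, pvNewStartA]
  simp only [h, if_true, pv_any_eq_contains]

-- A's state machine, flushed at the end, lists B's decision for every header line
lemma pv_loop_eq (target_lines : List Int) :
    ∀ (ls : List String) (acc : List Bool) (cur inH : Bool),
      (let st := ls.foldl (pvStepA target_lines) (acc, cur, inH)
       if st.2.2 then st.1 ++ [st.2.1] else st.1)
        = (if inH then acc ++ [cur] else acc)
          ++ (ls.filter (fun line => PySem.Str.startswith line "@@")).map
              (pvHunkDecisionB (pvNearSet target_lines)) := by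
  intro ls
  induction ls with
  | nil => intro acc cur inH; simp
  | cons line rest ih =>
    intro acc cur inH
    by_cases hhd : PySem.Str.startswith line "@@" = true
    · by_cases hlen : 3 ≤ (PySem.Str.split₀ line).length
      · have hdec := pv_decision_eq target_lines line hlen
        simp only [List.foldl_cons, List.filter_cons, pvStepA, hhd, hlen, if_true, ih,
          List.map_cons, hdec]
        split_ifs <;> simp
      · have hdec : pvHunkDecisionB (pvNearSet target_lines) line = false := by
          rw [pvHunkDecisionB]; simp only [hlen, if_false]
        simp only [List.foldl_cons, List.filter_cons, pvStepA, hhd, hlen, if_true, if_false, ih,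
          List.map_cons, hdec]
        split_ifs <;> simp
    · simp only [List.foldl_cons, List.filter_cons, pvStepA, hhd, Bool.false_eq_true, if_false]
      rw [ih]
      split_ifs <;> simp_all

-- ===== VERDICT (by name: the statement is the Claim_ definition above) =====
theorem parse_diff_for_target_lines_py_spec : Claim_equal_parse_diff_for_target_lines_py := by
  intro diff_output target_lines _hDom _hPre
  show parse_diff_for_target_lines_py diff_output target_lines
        = parse_diff_for_target_lines_py_alt diff_output target_lines
  rw [parse_diff_for_target_lines_py, parse_diff_for_target_lines_py_alt]
  simpa using pv_loop_eq target_lines ((PySem.Str.split? diff_output "\n").getD []) [] false false
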